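-- pv_equiv track=rewrite | github.com/Jonhfing/TIPE | code.py | colonneZeros
-- ===== SOURCE A (Python) =====
-- def colonneZeros(tab,n):
--   col = [n*[0] for i in range(n)]
--   for i in range(n):
--     if tab[0][i]==0 :
--       col[0][i]=1
--   for i in range(1,n):
--     for j in range(n):
--       if tab[i][j]==0:
--         col[i][j]= 1+col[i-1][j]
--       else:
--         col[i][j]=0
--   return col
-- ===== SOURCE B (Python) =====
-- def colonneZeros(tab, n):
--     res = []
--     for i in range(n):
--         row = []
--         for j in range(n):
--             c = 0
--             k = i
--             while k >= 0 and tab[k][j] == 0: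
--                 c += 1
--                 k -= 1
--             row.append(c)
--         res.append(row)
--     return res
-- ===== Notes on version B (the rewrite author's own statement) =====
-- stated objective: alternative
-- what changed: B computes each cell independently by re-scanning upward from (i,j) until a nonzero cell (naive per-cell recount, O(n^3)), instead of A's dynamic programming that reads the previous row of the output matrix with a special-cased row 0.
import Mathlib
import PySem

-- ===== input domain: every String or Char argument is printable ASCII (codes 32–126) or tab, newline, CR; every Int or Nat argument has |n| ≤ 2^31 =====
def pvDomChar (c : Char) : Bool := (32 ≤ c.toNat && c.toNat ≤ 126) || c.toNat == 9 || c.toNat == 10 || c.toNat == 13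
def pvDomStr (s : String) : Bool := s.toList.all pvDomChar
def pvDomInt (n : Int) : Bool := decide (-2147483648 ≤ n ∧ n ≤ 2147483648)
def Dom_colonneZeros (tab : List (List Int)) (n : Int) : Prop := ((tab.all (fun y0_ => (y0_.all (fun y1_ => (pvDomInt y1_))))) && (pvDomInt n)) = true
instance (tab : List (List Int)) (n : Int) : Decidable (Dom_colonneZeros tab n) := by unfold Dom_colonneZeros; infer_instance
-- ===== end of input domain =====

-- B recomputes every cell independently by re-scanning upward from (i,j) until a nonzero
-- cell (naive per-cell recount), instead of A's dynamic programming over the output's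
-- previous row with a special-cased row 0; objective: alternative (B is O(n^3), not faster).

-- ===== PORT A =====
-- literal transliteration of A; col[i][j] = v is pySetD/pyGetD, reads use pyGetD (in range under Pre_)
def colonneZeros (tab : List (List Int)) (n : Int) : List (List Int) :=
  let col0 := (PySem.List.pyRange 0 n 1).map (fun _ => PySem.List.pyRepeat [(0 : Int)] n)
  let col1 := (PySem.List.pyRange 0 n 1).foldl (fun col i =>
    if PySem.List.pyGetD (PySem.List.pyGetD tab 0 []) i 0 = 0 then
      PySem.List.pySetD col 0 (PySem.List.pySetD (PySem.List.pyGetD col 0 []) i 1)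
    else col) col0
  (PySem.List.pyRange 1 n 1).foldl (fun col i =>
    (PySem.List.pyRange 0 n 1).foldl (fun col j =>
      if PySem.List.pyGetD (PySem.List.pyGetD tab i []) j 0 = 0 then
        PySem.List.pySetD col i (PySem.List.pySetD (PySem.List.pyGetD col i []) j
          (1 + PySem.List.pyGetD (PySem.List.pyGetD col (i - 1) []) j 0))
      else
        PySem.List.pySetD col i (PySem.List.pySetD (PySem.List.pyGetD col i []) j 0)) col) col1

-- ===== PORT B =====
-- B's while loop 'while k >= 0 and tab[k][j] == 0: c += 1; k -= 1' ported as structural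
-- recursion on m = k + 1 (the number of rows still reachable above), accumulator c.
def bloop (tab : List (List Int)) (j : Int) : Nat → Int → Int
  | 0, c => c
  | m + 1, c =>
    if PySem.List.pyGetD (PySem.List.pyGetD tab (m : Int) []) j 0 = 0 then
      bloop tab j m (c + 1)
    else c

-- literal transliteration of Source B: per cell (i, j), recount zeros upward from row i
def colonneZeros_alt (tab : List (List Int)) (n : Int) : List (List Int) :=
  (PySem.List.pyRange 0 n 1).foldl (fun res i =>
    res ++ [(PySem.List.pyRange 0 n 1).foldl (fun row j =>
      row ++ [bloop tab j (i + 1).toNat 0]) []]) []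

-- ===== PRECONDITION & SPEC =====
-- Pre_ excludes exactly the inputs where the Python A raises IndexError: n > 0 but tab has
-- fewer than n rows or some of the first n rows has fewer than n entries (B raises there too).
def Pre_colonneZeros (tab : List (List Int)) (n : Int) : Prop :=
  n ≤ (tab.length : Int) ∧ ∀ r ∈ tab.take n.toNat, n ≤ (r.length : Int)
instance (tab : List (List Int)) (n : Int) : Decidable (Pre_colonneZeros tab n) := by
  unfold Pre_colonneZeros; infer_instance

def pvWitness_colonneZeros : List (List Int) × Int := ([[0, 1], [0, 0]], 2)

def Spec_colonneZeros (tab : List (List Int)) (n : Int) (out : List (List Int)) : Prop := out = colonneZeros_alt tab n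
instance (tab : List (List Int)) (n : Int) (out : List (List Int)) : Decidable (Spec_colonneZeros tab n out) := by unfold Spec_colonneZeros; infer_instance

-- ===== CLAIM (what is proved, stated in full; the proofs are below) =====
def Claim_equal_colonneZeros : Prop := ∀ (tab : List (List Int)) (n : Int), Dom_colonneZeros tab n → Pre_colonneZeros tab n → Spec_colonneZeros tab n (colonneZeros tab n)

-- ===== LEMMAS AND PROOFS =====

-- tab[i][j] as both ports read it (0 default; in range under Pre_)
def tv (tab : List (List Int)) (i j : Nat) : Int := (tab.getD i []).getD j 0

-- the upward run length of zeros ending at cell (i, j)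
def streak (tab : List (List Int)) (j : Nat) : Nat → Int
  | 0 => if tv tab 0 j = 0 then 1 else 0
  | i + 1 => if tv tab (i + 1) j = 0 then streak tab j i + 1 else 0

def grid (tab : List (List Int)) (N : Nat) : List (List Int) :=
  (List.range N).map (fun i => (List.range N).map (fun j => streak tab j i))

lemma set_map_range {α : Type} (N m : Nat) (f : Nat → α) (v : α) :
    ((List.range N).map f).set m v = (List.range N).map (fun k => if k = m then v else f k) := by
  apply List.ext_getElem
  · simp
  · intro i h1 h2
    simp only [List.getElem_set, List.getElem_map, List.getElem_range]
    by_cases h : i = m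
    · simp [h]
    · simp [h, Ne.symm h]

-- partial row r after the first m columns are written
def pr (tab : List (List Int)) (N r m : Nat) : List Int :=
  (List.range N).map (fun j => if j < m then streak tab j r else (0 : Int))

def zr (N : Nat) : List Int := (List.range N).map (fun _ => (0 : Int))

def fr (tab : List (List Int)) (N r : Nat) : List Int :=
  (List.range N).map (fun j => streak tab j r)

lemma pr_step (tab : List (List Int)) (N r m : Nat) :
    (pr tab N r m).set m (streak tab m r) = pr tab N r (m + 1) := by
  unfold pr
  rw [set_map_range]
  apply List.map_congr_left
  intro j _
  by_cases hj : j = m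
  · simp [hj]
  · by_cases hj2 : j < m <;> simp [hj2] <;> omega

lemma pr_stay (tab : List (List Int)) (N r m : Nat) (h : streak tab m r = 0) :
    pr tab N r (m + 1) = pr tab N r m := by
  unfold pr
  apply List.map_congr_left
  intro j _
  by_cases hj : j = m
  · simp [hj, h]
  · by_cases hj2 : j < m <;> simp [hj2] <;> omega

lemma phase1 (tab : List (List Int)) (N : Nat) : ∀ m, m ≤ N →
    (List.range m).foldl (fun col (k : Nat) =>
        if (tab.getD 0 []).getD k 0 = 0 then
          col.set 0 ((col.getD 0 []).set k 1)
        else col)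
      ((List.range N).map (fun _ => zr N))
    = (List.range N).map (fun t => if t = 0 then pr tab N 0 m else zr N) := by
  intro m
  induction m with
  | zero =>
    intro _
    apply List.map_congr_left
    intro t _
    by_cases h : t = 0 <;> simp [h, pr, zr]
  | succ m ih =>
    intro hm
    rw [List.range_succ, List.foldl_append, ih (by omega)]
    simp only [List.foldl_cons, List.foldl_nil]
    have hgd : ((List.range N).map (fun t => if t = 0 then pr tab N 0 m else zr N)).getD 0 []
        = pr tab N 0 m := by
      rw [PySem.List.getD_map_range _ _ _ _ (by omega : 0 < N)]
      simp
    by_cases hc : (tab.getD 0 []).getD m 0 = 0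
    · have h1 : streak tab m 0 = 1 := by simp only [streak, tv]; rw [if_pos hc]
      rw [if_pos hc, hgd, show (1 : Int) = streak tab m 0 from h1.symm,
        pr_step tab N 0 m, set_map_range]
      apply List.map_congr_left
      intro t _
      by_cases ht : t = 0 <;> simp [ht]
    · have h0 : streak tab m 0 = 0 := by simp only [streak, tv]; rw [if_neg hc]
      rw [if_neg hc]
      apply List.map_congr_left
      intro t _
      by_cases ht : t = 0 <;> simp [ht, pr_stay tab N 0 m h0]

lemma pr_full (tab : List (List Int)) (N r : Nat) : pr tab N r N = fr tab N r := by
  unfold pr fr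
  apply List.map_congr_left
  intro j hj
  simp [List.mem_range.mp hj]

lemma inner2 (tab : List (List Int)) (N K : Nat) (hK : K + 1 < N) : ∀ m, m ≤ N →
    (List.range m).foldl (fun col (j : Nat) =>
        if (tab.getD (K + 1) []).getD j 0 = 0 then
          col.set (K + 1) ((col.getD (K + 1) []).set j (1 + (col.getD K []).getD j 0))
        else
          col.set (K + 1) ((col.getD (K + 1) []).set j 0))
      ((List.range N).map (fun t => if t ≤ K then fr tab N t else zr N))
    = (List.range N).map (fun t =>
        if t = K + 1 then pr tab N (K + 1) m else if t ≤ K then fr tab N t else zr N) := by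
  intro m
  induction m with
  | zero =>
    intro _
    apply List.map_congr_left
    intro t _
    by_cases ht : t = K + 1
    · simp [ht, pr, zr, show ¬(K + 1 ≤ K) by omega]
    · simp [ht]
  | succ m ih =>
    intro hm
    rw [List.range_succ, List.foldl_append, ih (by omega)]
    simp only [List.foldl_cons, List.foldl_nil]
    have hrow : ((List.range N).map (fun t =>
        if t = K + 1 then pr tab N (K + 1) m else if t ≤ K then fr tab N t else zr N)).getD (K + 1) []
        = pr tab N (K + 1) m := by
      rw [PySem.List.getD_map_range _ _ _ _ hK]
      simp
    have hprev : ((List.range N).map (fun t =>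
        if t = K + 1 then pr tab N (K + 1) m else if t ≤ K then fr tab N t else zr N)).getD K []
        = fr tab N K := by
      rw [PySem.List.getD_map_range _ _ _ _ (by omega : K < N)]
      simp
    have hread : (fr tab N K).getD m 0 = streak tab m K := by
      unfold fr
      rw [PySem.List.getD_map_range _ _ _ _ (by omega : m < N)]
    by_cases hc : (tab.getD (K + 1) []).getD m 0 = 0
    · have hv : streak tab m (K + 1) = 1 + streak tab m K := by
        simp only [streak, tv]
        rw [if_pos hc]
        ring
      rw [if_pos hc, hrow, hprev, hread,
        show (1 + streak tab m K) = streak tab m (K + 1) from hv.symm,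
        pr_step, set_map_range]
      apply List.map_congr_left
      intro t _
      by_cases ht : t = K + 1 <;> simp [ht]
    · have h0 : streak tab m (K + 1) = 0 := by
        simp only [streak, tv]
        rw [if_neg hc]
      rw [if_neg hc, hrow,
        show (0 : Int) = streak tab m (K + 1) from h0.symm,
        pr_step, set_map_range]
      apply List.map_congr_left
      intro t _
      by_cases ht : t = K + 1 <;> simp [ht]

lemma outer2 (tab : List (List Int)) (N : Nat) : ∀ Kb, Kb ≤ N - 1 →
    (List.range Kb).foldl (fun col (k : Nat) =>
      (List.range N).foldl (fun col (j : Nat) =>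
        if (tab.getD (k + 1) []).getD j 0 = 0 then
          col.set (k + 1) ((col.getD (k + 1) []).set j (1 + (col.getD k []).getD j 0))
        else
          col.set (k + 1) ((col.getD (k + 1) []).set j 0)) col)
      ((List.range N).map (fun t => if t = 0 then fr tab N 0 else zr N))
    = (List.range N).map (fun t => if t ≤ Kb then fr tab N t else zr N) := by
  intro Kb
  induction Kb with
  | zero =>
    intro _
    apply List.map_congr_left
    intro t _
    by_cases ht : t = 0 <;> simp [ht]
  | succ K ih =>
    intro hK
    rw [List.range_succ, List.foldl_append, ih (by omega)]
    simp only [List.foldl_cons, List.foldl_nil]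
    rw [inner2 tab N K (by omega) N (le_refl N), pr_full]
    apply List.map_congr_left
    intro t _
    by_cases ht : t = K + 1
    · simp [ht]
    · by_cases ht2 : t ≤ K <;> simp [ht, ht2] <;> omega

lemma zr_eq (N : Nat) : List.replicate N (0 : Int) = zr N := by
  simp [zr]

lemma A_eq_grid (tab : List (List Int)) (n : Int) : colonneZeros tab n = grid tab n.toNat := by
  have hset0 : ∀ (xs : List (List Int)) (v : List Int),
      PySem.List.pySetD xs (0 : Int) v = xs.set 0 v := by
    intro xs v
    rw [PySem.List.pySetD_of_nonneg _ _ (by norm_num)]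
    rfl
  have H0 : ∀ k : Nat, (0 : Int) + (k : Int) = (k : Int) := by
    intro k; ring
  have H1 : ∀ k : Nat, (1 : Int) + (k : Int) = ((k + 1 : Nat) : Int) := by
    intro k; push_cast; ring
  have H2 : ∀ k : Nat, ((k + 1 : Nat) : Int) - 1 = (k : Int) := by
    intro k; push_cast; ring
  have H3 : (n - 1).toNat = n.toNat - 1 := by omega
  simp only [colonneZeros, PySem.List.pyRange_one,
    List.foldl_map, List.map_map, Function.comp_def, PySem.List.pyRepeat_singleton,
    PySem.List.pyGetD_zero, hset0, H0, H1, H2, H3, PySem.List.pyGetD_natCast,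
    PySem.List.pySetD_natCast, Int.sub_zero, zr_eq]
  rw [phase1 tab n.toNat n.toNat (le_refl _), pr_full,
    outer2 tab n.toNat (n.toNat - 1) (le_refl _)]
  apply List.map_congr_left
  intro t ht
  simp [show t ≤ n.toNat - 1 from by have := List.mem_range.mp ht; omega, fr]

-- the while-loop accumulator factors out
lemma bloop_acc (tab : List (List Int)) (j : Int) :
    ∀ m c, bloop tab j m c = c + bloop tab j m 0 := by
  intro m
  induction m with
  | zero => intro c; simp [bloop]
  | succ m ih =>
    intro c
    simp only [bloop]
    by_cases hc : PySem.List.pyGetD (PySem.List.pyGetD tab (m : Int) []) j 0 = 0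
    · rw [if_pos hc, if_pos hc, ih (c + 1), ih (0 + 1)]
      ring
    · rw [if_neg hc, if_neg hc]
      ring

-- B's per-cell recount equals the upward streak
lemma bloop_streak (tab : List (List Int)) (j : Nat) :
    ∀ i : Nat, bloop tab (j : Int) (i + 1) 0 = streak tab j i := by
  intro i
  induction i with
  | zero =>
    simp [bloop, streak, tv, PySem.List.pyGetD_natCast, PySem.List.pyGetD_zero]
  | succ i ih =>
    rw [show bloop tab (j : Int) (i + 1 + 1) 0
        = (if PySem.List.pyGetD (PySem.List.pyGetD tab ((i + 1 : Nat) : Int) []) (j : Int) 0 = 0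
           then bloop tab (j : Int) (i + 1) (0 + 1) else 0) from rfl]
    simp only [streak, tv, PySem.List.pyGetD_natCast]
    by_cases hc : (tab.getD (i + 1) []).getD j 0 = 0
    · rw [if_pos hc, if_pos hc, bloop_acc, ih]
      ring
    · rw [if_neg hc, if_neg hc]

lemma B_eq_grid (tab : List (List Int)) (n : Int) : colonneZeros_alt tab n = grid tab n.toNat := by
  simp only [colonneZeros_alt, PySem.List.pyRange_zero, List.foldl_map]
  rw [PySem.List.foldl_append_singleton_eq_map
    (f := fun (i : Nat) => List.foldl
      (fun row (j : Nat) => row ++ [bloop tab (j : Int) ((i : Int) + 1).toNat 0]) []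
      (List.range n.toNat))]
  simp only [List.nil_append, grid]
  apply List.map_congr_left
  intro i _
  rw [PySem.List.foldl_append_singleton_eq_map
      (f := fun (j : Nat) => bloop tab (j : Int) ((i : Int) + 1).toNat 0)]
  simp only [List.nil_append]
  apply List.map_congr_left
  intro j _
  have h : ((i : Int) + 1).toNat = i + 1 := by omega
  rw [h, bloop_streak]

-- ===== VERDICT (by name: the statement is the Claim_ definition above) =====
theorem colonneZeros_spec : Claim_equal_colonneZeros := by
  intro tab n _ _
  unfold Spec_colonneZeros
  rw [A_eq_grid, B_eq_grid]
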